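-- pv_equiv track=rewrite | github.com/JuanLopezAranzazu/advent-of-code-2025 | day02/py/solution.py | is_invalid_part2
-- ===== SOURCE A (Python) =====
-- def is_invalid_part2(n):
--     s = str(n)
--     L = len(s)
--
--     for size in range(1, L // 2 + 1):
--         if L % size != 0:
--             continue
--
--         pattern = s[:size]
--         if pattern * (L // size) == s:
--             return True
--
--     return False
-- ===== SOURCE B (Python) =====
-- def is_invalid_part2(n):
--     s = str(n)
--     return s in (s + s)[1:-1]
-- ===== Notes on version B (the rewrite author's own statement) =====
-- stated objective: idiomatic
-- what changed: Replaces the loop over divisor sizes with explicit pattern building and comparison by the classical one-line periodicity test 's in (s+s)[1:-1]'.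
import Mathlib
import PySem

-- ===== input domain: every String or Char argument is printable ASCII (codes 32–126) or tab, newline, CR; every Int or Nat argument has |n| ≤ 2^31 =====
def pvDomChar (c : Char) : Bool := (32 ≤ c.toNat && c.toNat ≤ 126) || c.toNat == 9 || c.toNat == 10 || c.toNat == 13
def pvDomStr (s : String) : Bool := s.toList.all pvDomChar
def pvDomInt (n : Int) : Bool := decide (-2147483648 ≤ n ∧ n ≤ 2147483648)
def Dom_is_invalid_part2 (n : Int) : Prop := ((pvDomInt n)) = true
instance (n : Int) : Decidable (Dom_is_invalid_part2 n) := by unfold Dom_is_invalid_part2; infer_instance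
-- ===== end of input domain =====

-- B replaces A's loop over candidate pattern sizes by the classical one-line periodicity
-- test `s in (s+s)[1:-1]` (idiomatic; same exact return value for every int n).


-- ===== PORT A =====
-- the 'for size in range(1, L // 2 + 1)' loop, with 'continue' on L % size != 0
def pvALoop (s : List Char) (L : Int) : List Int → Bool
  | [] => false
  | size :: rest =>
    if PySem.Int.mod L size ≠ 0 then pvALoop s L rest
    else if PySem.List.pyRepeat (PySem.List.slice s none (some size)) (PySem.Int.floordiv L size) = s then
      true
    else pvALoop s L rest

def is_invalid_part2 (n : Int) : Bool :=
  let s := PySem.Int.toChars n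
  let L : Int := (s.length : Int)
  pvALoop s L (PySem.List.pyRange 1 (PySem.Int.floordiv L 2 + 1) 1)

-- ===== PORT B =====
def is_invalid_part2_alt (n : Int) : Bool :=
  let s := PySem.Int.toChars n
  PySem.Chars.isIn s (PySem.List.slice (s ++ s) (some 1) (some (-1)))

-- ===== PRECONDITION & SPEC =====
def Spec_is_invalid_part2 (n : Int) (out : Bool) : Prop := out = is_invalid_part2_alt n
instance (n : Int) (out : Bool) : Decidable (Spec_is_invalid_part2 n out) := by unfold Spec_is_invalid_part2; infer_instance

-- ===== CLAIM (what is proved, stated in full; the proofs are below) =====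
def Claim_equal_is_invalid_part2 : Prop := ∀ (n : Int), Dom_is_invalid_part2 n → Spec_is_invalid_part2 n (is_invalid_part2 n)

-- ===== LEMMAS AND PROOFS =====

-- w repeated k times
def pvPow (w : List Char) (k : Nat) : List Char := (List.replicate k w).flatten

theorem pvPow_zero (w : List Char) : pvPow w 0 = [] := rfl

theorem pvPow_succ (w : List Char) (k : Nat) : pvPow w (k + 1) = w ++ pvPow w k := by
  simp [pvPow, List.replicate_succ]

theorem pvPow_nil (k : Nat) : pvPow ([] : List Char) k = [] := by
  simp [pvPow]

theorem pvPow_add (w : List Char) (a b : Nat) :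
    pvPow w (a + b) = pvPow w a ++ pvPow w b := by
  induction a with
  | zero => simp [pvPow_zero]
  | succ a ih =>
      have : a + 1 + b = (a + b) + 1 := by omega
      rw [this, pvPow_succ, pvPow_succ, ih, List.append_assoc]

theorem length_pvPow (w : List Char) (k : Nat) : (pvPow w k).length = k * w.length := by
  induction k with
  | zero => simp [pvPow_zero]
  | succ k ih => rw [pvPow_succ]; simp [ih]; ring

-- "s consists of at least two repetitions of its prefix of length d"
def pvPeriodic (s : List Char) : Prop :=
  ∃ d : Nat, 1 ≤ d ∧ 2 * d ≤ s.length ∧ d ∣ s.length ∧ pvPow (s.take d) (s.length / d) = s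

-- the commuting-words theorem: u ++ v = v ++ u → u and v are powers of a common word
theorem pv_comm_pow : ∀ (N : Nat) (u v : List Char), u.length + v.length ≤ N →
    u ++ v = v ++ u → ∃ w a b, u = pvPow w a ∧ v = pvPow w b := by
  intro N
  induction N with
  | zero =>
      intro u v hlen _
      have hu : u = [] := by
        cases u with
        | nil => rfl
        | cons x xs => simp at hlen
      have hv : v = [] := by
        cases v with
        | nil => rfl
        | cons x xs => simp at hlen
      exact ⟨[], 0, 0, by simp [hu, pvPow_zero], by simp [hv, pvPow_zero]⟩
  | succ N ih =>
      intro u v hlen hcomm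
      by_cases hu : u = []
      · exact ⟨v, 0, 1, by simp [hu, pvPow_zero], by simp [pvPow_succ, pvPow_zero]⟩
      by_cases hv : v = []
      · exact ⟨u, 1, 0, by simp [pvPow_succ, pvPow_zero], by simp [hv, pvPow_zero]⟩
      by_cases hle : u.length ≤ v.length
      · -- u is a prefix of v
        have hupre : u = List.take u.length v := by
          have h1 : u = List.take u.length (u ++ v) := by simp
          rw [hcomm] at h1
          rw [List.take_append] at h1
          have : u.length - v.length = 0 := by omega
          simpa [this] using h1
        set v' := List.drop u.length v with hv'def
        have hsplit : v = u ++ v' := by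
          conv_lhs => rw [← List.take_append_drop u.length v]
          rw [← hupre]
        have hcomm' : u ++ v' = v' ++ u := by
          have h2 : u ++ (u ++ v') = (u ++ v') ++ u := by rw [← hsplit]; exact hcomm
          rw [List.append_assoc] at h2
          exact List.append_cancel_left h2
        have hulen : 1 ≤ u.length := by
          cases u with
          | nil => exact absurd rfl hu
          | cons x xs => simp
        have hlen' : u.length + v'.length ≤ N := by
          have : v'.length = v.length - u.length := by simp [hv'def]
          omega
        obtain ⟨w, a, b, h1, h2⟩ := ih u v' hlen' hcomm'
        exact ⟨w, a, a + b, h1, by rw [hsplit, pvPow_add, h1, h2]⟩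
      · -- symmetric: v is a prefix of u
        have hvpre : v = List.take v.length u := by
          have h1 : v = List.take v.length (v ++ u) := by simp
          rw [← hcomm] at h1
          rw [List.take_append] at h1
          have : v.length - u.length = 0 := by omega
          simpa [this] using h1
        set u' := List.drop v.length u with hu'def
        have hsplit : u = v ++ u' := by
          conv_lhs => rw [← List.take_append_drop v.length u]
          rw [← hvpre]
        have hcomm' : v ++ u' = u' ++ v := by
          have h2 : v ++ (v ++ u') = (v ++ u') ++ v := by rw [← hsplit]; exact hcomm.symm
          rw [List.append_assoc] at h2
          exact List.append_cancel_left h2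
        have hvlen : 1 ≤ v.length := by
          cases v with
          | nil => exact absurd rfl hv
          | cons x xs => simp
        have hlen' : v.length + u'.length ≤ N := by
          have : u'.length = u.length - v.length := by simp [hu'def]
          omega
        obtain ⟨w, a, b, h1, h2⟩ := ih v u' hlen' hcomm'
        exact ⟨w, a + b, a, by rw [hsplit, pvPow_add, h1, h2], h1⟩

-- A's loop returns true iff some size in the list satisfies its body's test
theorem pvALoop_iff (s : List Char) (L : Int) (l : List Int) :
    pvALoop s L l = true ↔ ∃ size ∈ l, PySem.Int.mod L size = 0 ∧
      PySem.List.pyRepeat (PySem.List.slice s none (some size)) (PySem.Int.floordiv L size) = s := by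
  induction l with
  | nil => simp [pvALoop]
  | cons size rest ih =>
      simp only [pvALoop]
      split_ifs with h1 h2
      · rw [ih]
        constructor
        · rintro ⟨z, hz, hc⟩; exact ⟨z, List.mem_cons_of_mem _ hz, hc⟩
        · rintro ⟨z, hz, hc⟩
          rcases List.mem_cons.mp hz with rfl | hz'
          · exact absurd hc.1 h1
          · exact ⟨z, hz', hc⟩
      · simp only [true_iff]
        exact ⟨size, List.mem_cons_self, by simpa using h1, h2⟩
      · rw [ih]
        constructor
        · rintro ⟨z, hz, hc⟩; exact ⟨z, List.mem_cons_of_mem _ hz, hc⟩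
        · rintro ⟨z, hz, hc⟩
          rcases List.mem_cons.mp hz with rfl | hz'
          · exact absurd hc.2 h2
          · exact ⟨z, hz', hc⟩

-- A = true iff its string is periodic
theorem pvA_iff (n : Int) : is_invalid_part2 n = true ↔ pvPeriodic (PySem.Int.toChars n) := by
  set s := PySem.Int.toChars n with hs
  show pvALoop s _ _ = true ↔ _
  rw [pvALoop_iff]
  have h2 : PySem.Int.floordiv (s.length : Int) 2 = ((s.length / 2 : Nat) : Int) := by
    exact_mod_cast PySem.Int.floordiv_natCast s.length 2
  constructor
  · rintro ⟨size, hmem, hmod, hrep⟩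
    rw [PySem.List.mem_pyRange_one] at hmem
    obtain ⟨hge, hlt⟩ := hmem
    set d := size.toNat with hd
    have hsz : size = (d : Int) := by omega
    rw [hsz] at hmod hrep hlt
    rw [h2] at hlt
    have hdvd : d ∣ s.length := by
      have := (PySem.Int.mod_eq_zero_iff_dvd _ _).mp hmod
      exact_mod_cast this
    have hdle : d ≤ s.length / 2 := by omega
    have h2d : 2 * d ≤ s.length := by
      have := (Nat.le_div_iff_mul_le (by norm_num : 0 < 2)).mp hdle
      omega
    refine ⟨d, by omega, h2d, hdvd, ?_⟩
    rw [PySem.List.slice_to_natCast, PySem.Int.floordiv_natCast] at hrep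
    simpa [PySem.List.pyRepeat, pvPow] using hrep
  · rintro ⟨d, hd1, h2d, hdvd, hpow⟩
    refine ⟨(d : Int), ?_, ?_, ?_⟩
    · rw [PySem.List.mem_pyRange_one, h2]
      have : d ≤ s.length / 2 := (Nat.le_div_iff_mul_le (by norm_num : 0 < 2)).mpr (by omega)
      omega
    · exact (PySem.Int.mod_eq_zero_iff_dvd _ _).mpr (by exact_mod_cast hdvd)
    · rw [PySem.List.slice_to_natCast, PySem.Int.floordiv_natCast]
      simpa [PySem.List.pyRepeat, pvPow] using hpow

-- the slice (s+s)[1:-1] as drop/take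
theorem pv_slice_mid (xs : List Char) (hx : 1 ≤ xs.length) :
    PySem.List.slice xs (some 1) (some (-1)) = List.take (xs.length - 2) (List.drop 1 xs) := by
  have h1 : PySem.List.clampIdx xs.length 1 = 1 := by
    simp [PySem.List.clampIdx]
    omega
  have h2 : PySem.List.clampIdx xs.length (-1) = xs.length - 1 := by
    simp
  simp only [PySem.List.slice, h1, h2]
  congr 1

-- B = true iff s is an infix of (s+s)[1:-1]
theorem pv_toChars_ne_nil (n : Int) : PySem.Int.toChars n ≠ [] := by
  unfold PySem.Int.toChars
  split
  · simp
  · exact List.ne_nil_of_length_pos Nat.length_toDigits_pos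

theorem pvB_iff (n : Int) : is_invalid_part2_alt n = true ↔
    (PySem.Int.toChars n) <:+:
      List.take ((PySem.Int.toChars n).length + (PySem.Int.toChars n).length - 2)
        (List.drop 1 (PySem.Int.toChars n ++ PySem.Int.toChars n)) := by
  set s := PySem.Int.toChars n with hsdef
  have hs1 : 1 ≤ s.length := List.length_pos_of_ne_nil (pv_toChars_ne_nil n)
  show PySem.Chars.isIn s (PySem.List.slice (s ++ s) (some 1) (some (-1))) = true ↔ _
  rw [PySem.Chars.isIn_iff_infix, pv_slice_mid (s ++ s) (by simp [List.length_append]; omega)]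
  have h : (s ++ s).length = s.length + s.length := by simp [List.length_append]
  rw [h]

-- the core equivalence: infix occurrence in (s+s)[1:-1] ↔ periodicity
theorem pv_bridge (s : List Char) (hs : s ≠ []) :
    (s <:+: List.take (s.length + s.length - 2) (List.drop 1 (s ++ s))) ↔ pvPeriodic s := by
  have hL1 : 1 ≤ s.length := List.length_pos_of_ne_nil hs
  constructor
  · rintro ⟨a, b, hT⟩
    have hTlen : (List.take (s.length + s.length - 2) (List.drop 1 (s ++ s))).length
        = s.length + s.length - 2 := by
      simp [List.length_take, List.length_append]
      omega
    have hlen : a.length + s.length + b.length = s.length + s.length - 2 := by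
      have h := congrArg List.length hT
      rw [hTlen] at h
      simp [List.length_append] at h
      omega
    have hi : a.length + 1 ≤ s.length - 1 := by omega
    -- extract the occurrence of s at offset i := a.length + 1 inside s ++ s
    have hpre1 : (a ++ s) <+: List.take (s.length + s.length - 2) (List.drop 1 (s ++ s)) :=
      ⟨b, hT⟩
    obtain ⟨r, hr⟩ := hpre1.trans (List.take_prefix _ _)
    have h0 : List.drop 1 (s ++ s) = a ++ (s ++ r) := by rw [← hr, List.append_assoc]
    have hc1 : (List.take 1 (s ++ s)).length = 1 := by
      simp [List.length_take, List.length_append]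
      omega
    have hcc : s ++ s = (List.take 1 (s ++ s) ++ a) ++ (s ++ r) := by
      conv_lhs => rw [← List.take_append_drop 1 (s ++ s)]
      rw [h0, List.append_assoc]
    have hdrop : List.drop (a.length + 1) (s ++ s) = s ++ r := by
      have h : List.drop (List.take 1 (s ++ s) ++ a).length
          ((List.take 1 (s ++ s) ++ a) ++ (s ++ r)) = s ++ r := List.drop_left
      rw [← hcc] at h
      have hlen2 : (List.take 1 (s ++ s) ++ a).length = a.length + 1 := by
        simp [List.length_append, hc1]; omega
      rw [hlen2] at h
      exact h
    have hsub : s <+: List.drop (a.length + 1) (s ++ s) := by rw [hdrop]; exact ⟨r, rfl⟩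
    have hdropsplit : List.drop (a.length + 1) (s ++ s)
        = List.drop (a.length + 1) s ++ s := by
      rw [List.drop_append]
      have : a.length + 1 - s.length = 0 := by omega
      simp [this]
    -- the rotation identity
    have hrot : s = List.drop (a.length + 1) s ++ List.take (a.length + 1) s := by
      have h1 : s = List.take s.length (List.drop (a.length + 1) s ++ s) := by
        rw [← hdropsplit]
        exact List.prefix_iff_eq_take.mp hsub
      rw [List.take_append] at h1
      have h2 : List.take s.length (List.drop (a.length + 1) s)
          = List.drop (a.length + 1) s :=
        List.take_of_length_le (by simp [List.length_drop])
      have h3 : s.length - (List.drop (a.length + 1) s).length = a.length + 1 := by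
        simp [List.length_drop]; omega
      rw [h2, h3] at h1
      exact h1
    -- commuting words
    have hcomm : List.take (a.length + 1) s ++ List.drop (a.length + 1) s
        = List.drop (a.length + 1) s ++ List.take (a.length + 1) s := by
      rw [List.take_append_drop]
      exact hrot
    obtain ⟨w, ka, kb, hu, hv⟩ := pv_comm_pow
      ((List.take (a.length + 1) s).length + (List.drop (a.length + 1) s).length)
      _ _ le_rfl hcomm
    have hulen : (List.take (a.length + 1) s).length = a.length + 1 := by
      simp [List.length_take]; omega
    have hvlen : (List.drop (a.length + 1) s).length = s.length - (a.length + 1) := by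
      simp [List.length_drop]
    have hwne : 1 ≤ w.length := by
      rcases Nat.eq_zero_or_pos w.length with h | h
      · have hw : w = [] := List.eq_nil_of_length_eq_zero h
        rw [hw, pvPow_nil] at hu
        rw [hu] at hulen
        simp at hulen
      · exact h
    have hka : 1 ≤ ka := by
      rcases Nat.eq_zero_or_pos ka with h | h
      · rw [h, pvPow_zero] at hu
        rw [hu] at hulen
        simp at hulen
      · exact h
    have hkb : 1 ≤ kb := by
      rcases Nat.eq_zero_or_pos kb with h | h
      · rw [h, pvPow_zero] at hv
        rw [hv] at hvlen
        simp at hvlen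
        omega
      · exact h
    have hspow : s = pvPow w (ka + kb) := by
      conv_lhs => rw [← List.take_append_drop (a.length + 1) s]
      rw [hu, hv, pvPow_add]
    have hLeq : s.length = (ka + kb) * w.length := by
      have h := congrArg List.length hspow
      rw [length_pvPow] at h
      exact h
    refine ⟨w.length, hwne, ?_, ⟨ka + kb, by rw [hLeq, Nat.mul_comm]⟩, ?_⟩
    · calc 2 * w.length ≤ (ka + kb) * w.length := Nat.mul_le_mul_right _ (by omega)
        _ = s.length := hLeq.symm
    · have htake : List.take w.length s = w := by
        obtain ⟨c, hc⟩ : ∃ c, ka + kb = c + 1 := ⟨ka + kb - 1, by omega⟩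
        rw [hspow, hc, pvPow_succ, List.take_left]
      have hdiv : s.length / w.length = ka + kb := by
        rw [hLeq]
        exact Nat.mul_div_cancel _ (by omega)
      rw [htake, hdiv]
      exact hspow.symm
  · rintro ⟨d, hd1, h2d, hdvd, hpow⟩
    have hLeq : s.length = (s.length / d) * d := (Nat.div_mul_cancel hdvd).symm
    have hk2 : 2 ≤ s.length / d := by
      rcases Nat.lt_or_ge (s.length / d) 2 with h | h
      · have : s.length / d * d ≤ 1 * d := Nat.mul_le_mul_right d (by omega)
        omega
      · exact h
    have hplen : (List.take d s).length = d := by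
      simp [List.length_take]
      omega
    have hsp : s = pvPow (List.take d s) (s.length / d) := hpow.symm
    have hss : s ++ s = List.take d s ++ (s ++ pvPow (List.take d s) (s.length / d - 1)) := by
      calc s ++ s = pvPow (List.take d s) (s.length / d) ++ pvPow (List.take d s) (s.length / d) := by
            rw [← hsp]
        _ = pvPow (List.take d s) (s.length / d + s.length / d) := (pvPow_add _ _ _).symm
        _ = pvPow (List.take d s) (1 + (s.length / d + (s.length / d - 1))) := by
            congr 1
            omega
        _ = pvPow (List.take d s) 1 ++ pvPow (List.take d s) (s.length / d + (s.length / d - 1)) :=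
            pvPow_add _ _ _
        _ = List.take d s ++ (pvPow (List.take d s) (s.length / d)
              ++ pvPow (List.take d s) (s.length / d - 1)) := by
            rw [pvPow_add]
            congr 1
            simp [pvPow_succ, pvPow_zero]
        _ = List.take d s ++ (s ++ pvPow (List.take d s) (s.length / d - 1)) := by rw [← hsp]
    have hdrop1 : List.drop 1 (s ++ s)
        = List.drop 1 (List.take d s) ++ (s ++ pvPow (List.take d s) (s.length / d - 1)) := by
      rw [hss, List.drop_append]
      have h1 : 1 - min d s.length = 0 := by omega
      rw [List.length_take, h1, List.drop_zero]
    have hdLL : d + 1 ≤ s.length := by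
      have h2 : 2 * d ≤ s.length / d * d := Nat.mul_le_mul_right d hk2
      omega
    have hxlen : (List.drop 1 (List.take d s) ++ s).length = d - 1 + s.length := by
      simp [List.length_append, hplen]
    have htake2 : List.take (s.length + s.length - 2) (List.drop 1 (s ++ s))
        = (List.drop 1 (List.take d s) ++ s)
          ++ List.take (s.length - d - 1) (pvPow (List.take d s) (s.length / d - 1)) := by
      rw [hdrop1, ← List.append_assoc, List.take_append]
      congr 1
      · exact List.take_of_length_le (by rw [hxlen]; omega)
      · congr 1
        rw [hxlen]
        omega
    exact ⟨List.drop 1 (List.take d s),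
      List.take (s.length - d - 1) (pvPow (List.take d s) (s.length / d - 1)),
      by rw [htake2, List.append_assoc]⟩

-- ===== VERDICT (by name: the statement is the Claim_ definition above) =====
theorem is_invalid_part2_spec : Claim_equal_is_invalid_part2 := by
  intro n _
  unfold Spec_is_invalid_part2
  have h := (pvA_iff n).trans
    ((pv_bridge (PySem.Int.toChars n) (pv_toChars_ne_nil n)).symm.trans (pvB_iff n).symm)
  cases hA : is_invalid_part2 n
  · cases hB : is_invalid_part2_alt n
    · rfl
    · exact absurd (h.mpr hB) (by simp [hA])
  · exact (h.mp hA).symm
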